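-- pv_equiv track=rewrite | github.com/srivarshan-s/DNA-Sequence-Alignment | code/basic_3.py | bottom_up
-- ===== SOURCE A (Python) =====
-- DELTA = 30  # Gap penalty
--
-- def alpha(x, y):
--     char_map = {
--         "A": 0,
--         "C": 1,
--         "G": 2,
--         "T": 3,
--     }
--     alpha_matrix = [
--         [0, 110, 48, 94],
--         [110, 0, 118, 48],
--         [48, 118, 0, 110],
--         [94, 48, 110, 0],
--     ]
--     return alpha_matrix[char_map[x]][char_map[y]]
--
-- def bottom_up(str_1, str_2):
--     # Initialize the OPT matrix
--     n_rows = len(str_1) + 1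
--     n_cols = len(str_2) + 1
--     OPT = [[0 for _ in range(n_cols)] for _ in range(n_rows)]
--
--     # Initialize first row
--     for i in range(n_rows):
--         OPT[i][0] = i * DELTA
--
--     # Initialize first column
--     for j in range(n_cols):
--         OPT[0][j] = j * DELTA
--
--     # Bottom-up pass
--     for i in range(1, n_rows):
--         for j in range(1, n_cols):
--             delta_1 = OPT[i - 1][j] + DELTA  # Gap in str_1
--             delta_2 = OPT[i][j - 1] + DELTA  # Gap in str_2
--             # Match/Mismatch
--             alph = OPT[i - 1][j - 1] + alpha(str_1[i - 1], str_2[j - 1])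
--             # Set OPT val to minimum of the above 3
--             OPT[i][j] = min(delta_1, delta_2, alph)
--
--     return OPT
-- ===== SOURCE B (Python) =====
-- DELTA = 30  # Gap penalty
--
--
-- def _score(x, y):
--     # mismatch cost, symmetric; 0 on a match
--     if x == y:
--         return 0
--     m = {
--         ("A", "C"): 110,
--         ("A", "G"): 48,
--         ("A", "T"): 94,
--         ("C", "G"): 118,
--         ("C", "T"): 48,
--         ("G", "T"): 110,
--     }
--     s = m.get((x, y))
--     return s if s is not None else m[(y, x)]
--
--
-- def bottom_up(str_1, str_2):
--     # Top-down memoized recursion: each cell is defined by solve(i, j);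
--     # no pre-allocated matrix and no separate boundary-init passes.
--     memo = {}
--
--     def solve(i, j):
--         hit = memo.get((i, j))
--         if hit is not None:
--             return hit
--         if i == 0:
--             v = j * DELTA
--         elif j == 0:
--             v = i * DELTA
--         else:
--             v = min(solve(i - 1, j) + DELTA,
--                     solve(i, j - 1) + DELTA,
--                     solve(i - 1, j - 1) + _score(str_1[i - 1], str_2[j - 1]))
--         memo[(i, j)] = v
--         return v
--
--     return [[solve(i, j) for j in range(len(str_2) + 1)]
--             for i in range(len(str_1) + 1)]
-- ===== Notes on version B (the rewrite author's own statement) =====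
-- stated objective: alternative
-- what changed: A is an iterative bottom-up fill of a pre-allocated (m+1)x(n+1) matrix with separate boundary-init passes and index-arithmetic writes; B is a top-down memoized recursion solve(i,j) over a dictionary (demand-driven, no matrix mutation, no init passes), with the table assembled by querying solve per cell, and a symmetric pair-keyed mismatch table instead of A's char-index matrix.
import Mathlib
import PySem

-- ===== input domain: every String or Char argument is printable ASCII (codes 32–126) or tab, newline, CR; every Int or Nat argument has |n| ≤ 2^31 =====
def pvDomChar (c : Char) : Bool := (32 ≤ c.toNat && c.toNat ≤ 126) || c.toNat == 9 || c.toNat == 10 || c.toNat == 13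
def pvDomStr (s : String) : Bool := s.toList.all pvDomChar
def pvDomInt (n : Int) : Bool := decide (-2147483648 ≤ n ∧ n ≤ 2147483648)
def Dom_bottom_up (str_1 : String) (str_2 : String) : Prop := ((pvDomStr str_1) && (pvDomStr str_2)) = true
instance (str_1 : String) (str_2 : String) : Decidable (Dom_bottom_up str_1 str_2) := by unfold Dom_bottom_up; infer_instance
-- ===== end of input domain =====

-- B replaces A's iterative bottom-up matrix fill by a top-down memoized
-- recursion over a dictionary (objective: alternative).

-- ===== PORT A =====
def pvDELTA : Int := 30

-- A's alpha: char_map[x] raises KeyError outside "ACGT"; Pre_ excludes those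
-- inputs, so the total-form defaults (getD 0) are never read under Pre_.
def pvAlphaA (x y : Char) : Int :=
  let char_map : PySem.Dict Char Int := PySem.Dict.ofList [('A', 0), ('C', 1), ('G', 2), ('T', 3)]
  let alpha_matrix : List (List Int) := [[0, 110, 48, 94], [110, 0, 118, 48], [48, 118, 0, 110], [94, 48, 110, 0]]
  PySem.List.pyGetD (PySem.List.pyGetD alpha_matrix (char_map.getD x 0) []) (char_map.getD y 0) 0

-- OPT[i][j] read / OPT[i][j] = v write (indices always in range in A's loops)
def pvGet2 (O : List (List Int)) (i j : Int) : Int :=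
  PySem.List.pyGetD (PySem.List.pyGetD O i []) j 0
def pvSet2 (O : List (List Int)) (i j : Int) (v : Int) : List (List Int) :=
  PySem.List.pySetD O i (PySem.List.pySetD (PySem.List.pyGetD O i []) j v)

def bottom_up (str_1 : String) (str_2 : String) : List (List Int) :=
  let n_rows : Int := PySem.Str.len str_1 + 1
  let n_cols : Int := PySem.Str.len str_2 + 1
  let OPT0 : List (List Int) :=
    (PySem.List.pyRange 0 n_rows 1).map (fun _ => (PySem.List.pyRange 0 n_cols 1).map (fun _ => (0 : Int)))
  let OPT1 := (PySem.List.pyRange 0 n_rows 1).foldl (fun O i => pvSet2 O i 0 (i * pvDELTA)) OPT0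
  let OPT2 := (PySem.List.pyRange 0 n_cols 1).foldl (fun O j => pvSet2 O 0 j (j * pvDELTA)) OPT1
  (PySem.List.pyRange 1 n_rows 1).foldl (fun O i =>
    (PySem.List.pyRange 1 n_cols 1).foldl (fun O j =>
      let delta_1 := pvGet2 O (i - 1) j + pvDELTA
      let delta_2 := pvGet2 O i (j - 1) + pvDELTA
      let alph := pvGet2 O (i - 1) (j - 1) +
        pvAlphaA (PySem.List.pyGetD str_1.toList (i - 1) ' ') (PySem.List.pyGetD str_2.toList (j - 1) ' ')
      pvSet2 O i j (min (min delta_1 delta_2) alph)) O) OPT2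

-- ===== PORT B =====
-- B's _score: m[(y,x)] raises KeyError outside ACGT pairs; never reached under Pre_ (getD 0 never read).
def pvScoreB (x y : Char) : Int :=
  if x = y then 0
  else
    let m : PySem.Dict (Char × Char) Int := PySem.Dict.ofList
      [(('A', 'C'), 110), (('A', 'G'), 48), (('A', 'T'), 94),
       (('C', 'G'), 118), (('C', 'T'), 48), (('G', 'T'), 110)]
    match m.get? (x, y) with
    | some s => s
    | none => (m.get? (y, x)).getD 0

-- B's solve(i, j): memo-threading transliteration of the memoized recursion;
-- indices are the loop's Nats, str_1[i-1]/str_2[j-1] are in range whenever read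
-- (i ≥ 1, i - 1 < len), ported with getD.
def pvSolve (s1 s2 : List Char) (i j : Nat) (memo : PySem.Dict (Nat × Nat) Int) :
    Int × PySem.Dict (Nat × Nat) Int :=
  match memo.get? (i, j) with
  | some v => (v, memo)
  | none =>
    if _hi : i = 0 then
      ((j : Int) * 30, memo.insert (i, j) ((j : Int) * 30))
    else if _hj : j = 0 then
      ((i : Int) * 30, memo.insert (i, j) ((i : Int) * 30))
    else
      let r1 := pvSolve s1 s2 (i - 1) j memo
      let r2 := pvSolve s1 s2 i (j - 1) r1.2
      let r3 := pvSolve s1 s2 (i - 1) (j - 1) r2.2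
      let v := min (min (r1.1 + 30) (r2.1 + 30))
        (r3.1 + pvScoreB (s1.getD (i - 1) ' ') (s2.getD (j - 1) ' '))
      (v, r3.2.insert (i, j) v)
termination_by i + j
decreasing_by all_goals omega

def bottom_up_alt (str_1 : String) (str_2 : String) : List (List Int) :=
  let s1 := str_1.toList
  let s2 := str_2.toList
  ((List.range (s1.length + 1)).foldl (fun st i =>
    let inner := (List.range (s2.length + 1)).foldl (fun st2 j =>
      let r := pvSolve s1 s2 i j st2.2
      (st2.1 ++ [r.1], r.2)) (([] : List Int), st.2)
    (st.1 ++ [inner.1], inner.2)) (([] : List (List Int)), PySem.Dict.empty)).1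

-- ===== PRECONDITION & SPEC =====
def pvACGT : List Char := ['A', 'C', 'G', 'T']

-- Pre_ excludes exactly the inputs where A raises KeyError: both strings
-- nonempty and some character outside "ACGT" (alpha is never called otherwise).
def Pre_bottom_up (str_1 : String) (str_2 : String) : Prop :=
  str_1.toList = [] ∨ str_2.toList = [] ∨ ((∀ c ∈ str_1.toList, c ∈ pvACGT) ∧ (∀ c ∈ str_2.toList, c ∈ pvACGT))
instance (str_1 : String) (str_2 : String) : Decidable (Pre_bottom_up str_1 str_2) := by
  unfold Pre_bottom_up; infer_instance

def pvWitness_bottom_up : String × String := ("AC", "")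

def Spec_bottom_up (str_1 : String) (str_2 : String) (out : List (List Int)) : Prop := out = bottom_up_alt str_1 str_2
instance (str_1 : String) (str_2 : String) (out : List (List Int)) : Decidable (Spec_bottom_up str_1 str_2 out) := by unfold Spec_bottom_up; infer_instance

-- ===== CLAIM (what is proved, stated in full; the proofs are below) =====
def Claim_equal_bottom_up : Prop := ∀ (str_1 : String) (str_2 : String), Dom_bottom_up str_1 str_2 → Pre_bottom_up str_1 str_2 → Spec_bottom_up str_1 str_2 (bottom_up str_1 str_2)

-- ===== LEMMAS AND PROOFS =====

-- the DP recurrence both programs compute, parametrised by the mismatch score g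
def pvOpt (g : Char → Char → Int) (s1 s2 : List Char) : Nat → Nat → Int
  | 0, j => (j : Int) * 30
  | i + 1, 0 => ((i : Int) + 1) * 30
  | i + 1, j + 1 =>
    min (min (pvOpt g s1 s2 i (j + 1) + 30) (pvOpt g s1 s2 (i + 1) j + 30))
      (pvOpt g s1 s2 i j + g (s1.getD i ' ') (s2.getD j ' '))

def pvRow (g : Char → Char → Int) (s1 s2 : List Char) (i : Nat) : List Int :=
  (List.range (s2.length + 1)).map (fun j => pvOpt g s1 s2 i j)

def pvTab (g : Char → Char → Int) (s1 s2 : List Char) : List (List Int) :=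
  (List.range (s1.length + 1)).map (pvRow g s1 s2)

lemma pvAlpha_eq_score (c d : Char) (hc : c ∈ pvACGT) (hd : d ∈ pvACGT) :
    pvAlphaA c d = pvScoreB c d := by
  simp only [pvACGT, List.mem_cons, List.not_mem_nil, or_false] at hc hd
  rcases hc with rfl | rfl | rfl | rfl <;> rcases hd with rfl | rfl | rfl | rfl <;> decide

lemma pvOpt_congr (g g' : Char → Char → Int) (s1 s2 : List Char)
    (h : ∀ i < s1.length, ∀ j < s2.length, g (s1.getD i ' ') (s2.getD j ' ') = g' (s1.getD i ' ') (s2.getD j ' ')) :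
    ∀ i j, i ≤ s1.length → j ≤ s2.length → pvOpt g s1 s2 i j = pvOpt g' s1 s2 i j := by
  intro i j
  induction i generalizing j with
  | zero => intro _ _; simp [pvOpt]
  | succ i ih =>
    induction j with
    | zero => intro _ _; simp [pvOpt]
    | succ j ihj =>
      intro hi hj
      simp only [pvOpt]
      rw [ih (j + 1) (by omega) hj, ih j (by omega) (by omega),
        ihj (by omega) (by omega), h i (by omega) j (by omega)]

lemma pvTab_congr (g g' : Char → Char → Int) (s1 s2 : List Char)
    (h : ∀ i < s1.length, ∀ j < s2.length, g (s1.getD i ' ') (s2.getD j ' ') = g' (s1.getD i ' ') (s2.getD j ' ')) :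
    pvTab g s1 s2 = pvTab g' s1 s2 := by
  unfold pvTab pvRow
  refine List.map_congr_left ?_
  intro i hi
  refine List.map_congr_left ?_
  intro j hj
  simp only [List.mem_range, Nat.lt_succ_iff] at hi hj
  exact pvOpt_congr g g' s1 s2 h i j hi hj

-- ==== B-side machinery: the memo invariant and solve's correctness ====
def pvInv (s1 s2 : List Char) (memo : PySem.Dict (Nat × Nat) Int) : Prop :=
  ∀ p v, memo.get? p = some v → v = pvOpt pvScoreB s1 s2 p.1 p.2

lemma pvInv_empty (s1 s2 : List Char) : pvInv s1 s2 PySem.Dict.empty := by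
  intro p v h
  simp [PySem.Dict.get?_empty] at h

lemma pvInv_insert (s1 s2 : List Char) (memo : PySem.Dict (Nat × Nat) Int) (i j : Nat) (v : Int)
    (h : pvInv s1 s2 memo) (hv : v = pvOpt pvScoreB s1 s2 i j) :
    pvInv s1 s2 (memo.insert (i, j) v) := by
  intro p w hw
  rw [PySem.Dict.get?_insert] at hw
  by_cases hp : p = (i, j)
  · rw [if_pos hp] at hw
    cases hw
    subst hp
    exact hv
  · rw [if_neg hp] at hw
    exact h p w hw

lemma pvSolve_spec (s1 s2 : List Char) :
    ∀ (n i j : Nat) (memo : PySem.Dict (Nat × Nat) Int), i + j ≤ n → pvInv s1 s2 memo →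
      (pvSolve s1 s2 i j memo).1 = pvOpt pvScoreB s1 s2 i j ∧
        pvInv s1 s2 (pvSolve s1 s2 i j memo).2 := by
  intro n
  induction n with
  | zero =>
    intro i j memo hn h
    have hi : i = 0 := by omega
    have hj : j = 0 := by omega
    subst hi; subst hj
    rw [pvSolve]
    cases hmem : memo.get? ((0 : Nat), (0 : Nat)) with
    | some v =>
      exact ⟨h _ v hmem, h⟩
    | none =>
      simp only [pvOpt]
      exact ⟨by simp, pvInv_insert s1 s2 memo 0 0 _ h (by simp [pvOpt])⟩
  | succ n ih =>
    intro i j memo hn h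
    rw [pvSolve]
    cases hmem : memo.get? (i, j) with
    | some v =>
      exact ⟨h _ v hmem, h⟩
    | none =>
      by_cases hi : i = 0
      · subst hi
        refine ⟨by simp [pvOpt], pvInv_insert s1 s2 memo 0 j _ h (by simp [pvOpt])⟩
      · by_cases hj : j = 0
        · subst hj
          simp only [dif_neg hi]
          obtain ⟨i', rfl⟩ : ∃ i', i = i' + 1 := ⟨i - 1, by omega⟩
          refine ⟨by simp [pvOpt], pvInv_insert s1 s2 memo (i' + 1) 0 _ h (by push_cast [pvOpt]; ring)⟩
        · simp only [dif_neg hi, dif_neg hj]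
          obtain ⟨h1, hI1⟩ := ih (i - 1) j memo (by omega) h
          obtain ⟨h2, hI2⟩ := ih i (j - 1) (pvSolve s1 s2 (i - 1) j memo).2 (by omega) hI1
          obtain ⟨h3, hI3⟩ := ih (i - 1) (j - 1) (pvSolve s1 s2 i (j - 1) (pvSolve s1 s2 (i - 1) j memo).2).2 (by omega) hI2
          obtain ⟨i', rfl⟩ : ∃ i', i = i' + 1 := ⟨i - 1, by omega⟩
          obtain ⟨j', rfl⟩ : ∃ j', j = j' + 1 := ⟨j - 1, by omega⟩
          simp only [Nat.add_sub_cancel] at h1 h2 h3 hI3 ⊢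
          have hval : min (min ((pvSolve s1 s2 i' (j' + 1) memo).1 + 30)
                ((pvSolve s1 s2 (i' + 1) j' (pvSolve s1 s2 i' (j' + 1) memo).2).1 + 30))
              ((pvSolve s1 s2 i' j' (pvSolve s1 s2 (i' + 1) j' (pvSolve s1 s2 i' (j' + 1) memo).2).2).1 +
                pvScoreB (s1.getD i' ' ') (s2.getD j' ' '))
              = pvOpt pvScoreB s1 s2 (i' + 1) (j' + 1) := by
            rw [h1, h2, h3]
            conv_rhs => rw [pvOpt]
          exact ⟨hval, pvInv_insert s1 s2 _ (i' + 1) (j' + 1) _ hI3 hval⟩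

lemma pvInner_fold (s1 s2 : List Char) (i : Nat) (js : List Nat) :
    ∀ (acc : List Int) (memo : PySem.Dict (Nat × Nat) Int), pvInv s1 s2 memo →
      (js.foldl (fun st2 j =>
          let r := pvSolve s1 s2 i j st2.2
          (st2.1 ++ [r.1], r.2)) (acc, memo)).1
        = acc ++ js.map (fun j => pvOpt pvScoreB s1 s2 i j) ∧
      pvInv s1 s2 (js.foldl (fun st2 j =>
          let r := pvSolve s1 s2 i j st2.2
          (st2.1 ++ [r.1], r.2)) (acc, memo)).2 := by
  induction js with
  | nil => intro acc memo h; exact ⟨by simp, h⟩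
  | cons j js ihj =>
    intro acc memo h
    obtain ⟨hv, hI⟩ := pvSolve_spec s1 s2 (i + j) i j memo le_rfl h
    simp only [List.foldl_cons, List.map_cons]
    obtain ⟨e1, e2⟩ := ihj (acc ++ [(pvSolve s1 s2 i j memo).1]) (pvSolve s1 s2 i j memo).2 hI
    exact ⟨by rw [e1, hv]; simp, e2⟩

lemma pvOuter_fold (s1 s2 : List Char) (is : List Nat) :
    ∀ (acc : List (List Int)) (memo : PySem.Dict (Nat × Nat) Int), pvInv s1 s2 memo →
      (is.foldl (fun st i =>
          let inner := (List.range (s2.length + 1)).foldl (fun st2 j =>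
            let r := pvSolve s1 s2 i j st2.2
            (st2.1 ++ [r.1], r.2)) (([] : List Int), st.2)
          (st.1 ++ [inner.1], inner.2)) (acc, memo)).1
        = acc ++ is.map (pvRow pvScoreB s1 s2) := by
  induction is with
  | nil => intro acc memo _; simp
  | cons i is ihi =>
    intro acc memo h
    obtain ⟨e1, e2⟩ := pvInner_fold s1 s2 i (List.range (s2.length + 1)) [] memo h
    simp only [List.foldl_cons, List.map_cons]
    rw [ihi _ _ e2]
    rw [e1]
    simp [pvRow]

lemma bottom_up_alt_eq_tab (str_1 str_2 : String) :
    bottom_up_alt str_1 str_2 = pvTab pvScoreB str_1.toList str_2.toList := by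
  unfold bottom_up_alt
  rw [pvOuter_fold str_1.toList str_2.toList (List.range (str_1.toList.length + 1)) []
    PySem.Dict.empty (pvInv_empty _ _)]
  simp [pvTab]

-- ==== A-side machinery: Nat-indexed matrix access and the fill invariant ====
def pvG (M : List (List Int)) (r c : Nat) : Int := (M.getD r []).getD c 0

def pvSetN (M : List (List Int)) (i j : Nat) (v : Int) : List (List Int) :=
  M.set i ((M.getD i []).set j v)

def pvInit (r c : Nat) : Int :=
  if r = 0 then (c : Int) * 30 else if c = 0 then (r : Int) * 30 else 0

-- invariant: shape (m+1) × (n+1) and entrywise values val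
def pvP (m n : Nat) (M : List (List Int)) (val : Nat → Nat → Int) : Prop :=
  M.length = m + 1 ∧ (∀ r, r < m + 1 → (M.getD r []).length = n + 1) ∧
    (∀ r c, r < m + 1 → c < n + 1 → pvG M r c = val r c)

lemma pvSet2_natCast (O : List (List Int)) (i j : Nat) (v : Int) :
    pvSet2 O (i : Int) (j : Int) v = pvSetN O i j v := by
  simp [pvSet2, pvSetN, PySem.List.pySetD_natCast, PySem.List.pyGetD_natCast]

lemma pvGet2_natCast (O : List (List Int)) (i j : Nat) :
    pvGet2 O (i : Int) (j : Int) = pvG O i j := by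
  simp [pvGet2, pvG, PySem.List.pyGetD_natCast]

lemma pvGetD_set_eq {α : Type} (M : List α) (i : Nat) (R : α) (d : α) (hi : i < M.length) :
    (M.set i R).getD i d = R := by
  rw [List.getD_eq_getElem?_getD, List.getElem?_set_self hi, Option.getD_some]

lemma pvGetD_set_ne {α : Type} (M : List α) (i r : Nat) (R : α) (d : α) (hr : r ≠ i) :
    (M.set i R).getD r d = M.getD r d := by
  rw [List.getD_eq_getElem?_getD, List.getElem?_set_ne (fun h => hr h.symm),
    ← List.getD_eq_getElem?_getD]

lemma pvG_setN (M : List (List Int)) (i j : Nat) (v : Int) (r c : Nat)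
    (hi : i < M.length) (hj : j < (M.getD i []).length) :
    pvG (pvSetN M i j v) r c = if r = i ∧ c = j then v else pvG M r c := by
  unfold pvG pvSetN
  by_cases hr : r = i
  · subst hr
    rw [pvGetD_set_eq M r _ [] hi]
    by_cases hc : c = j
    · subst hc
      rw [if_pos ⟨rfl, rfl⟩, pvGetD_set_eq _ c v 0 hj]
    · rw [if_neg (fun h => hc h.2), pvGetD_set_ne _ j c v 0 hc]
  · rw [if_neg (fun h => hr h.1), pvGetD_set_ne M i r _ [] hr]

lemma pvG_def (M : List (List Int)) (r c : Nat) : pvG M r c = (M.getD r []).getD c 0 := rfl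

lemma pvP_congr (m n : Nat) (M : List (List Int)) (val val' : Nat → Nat → Int)
    (h : pvP m n M val) (he : ∀ r c, r < m + 1 → c < n + 1 → val r c = val' r c) :
    pvP m n M val' := by
  obtain ⟨h1, h2, h3⟩ := h
  exact ⟨h1, h2, fun r c hr hc => (h3 r c hr hc).trans (he r c hr hc)⟩

lemma pvP_setN (m n : Nat) (M : List (List Int)) (val : Nat → Nat → Int) (i j : Nat) (v : Int)
    (h : pvP m n M val) (hi : i < m + 1) (hj : j < n + 1) :
    pvP m n (pvSetN M i j v) (fun r c => if r = i ∧ c = j then v else val r c) := by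
  obtain ⟨h1, h2, h3⟩ := h
  have hi' : i < M.length := by omega
  have hj' : j < (M.getD i []).length := by rw [h2 i hi]; omega
  refine ⟨by simp [pvSetN, List.length_set, h1], ?_, ?_⟩
  · intro r hr
    by_cases hr' : r = i
    · subst hr'
      rw [pvSetN, pvGetD_set_eq M r _ [] hi', List.length_set]
      exact h2 r hr
    · rw [pvSetN, pvGetD_set_ne M i r _ [] hr']
      exact h2 r hr
  · intro r c hr hc
    rw [pvG_setN M i j v r c hi' hj']
    by_cases hcase : r = i ∧ c = j
    · simp [hcase]
    · simp only [if_neg hcase]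
      exact h3 r c hr hc

-- column init: OPT[i][0] = i * 30
lemma pvPhase_col (m n : Nat) (M : List (List Int)) (val : Nat → Nat → Int) (h : pvP m n M val) :
    ∀ K, K ≤ m + 1 →
      pvP m n ((List.range K).foldl (fun O k => pvSetN O k 0 ((k : Int) * 30)) M)
        (fun r c => if r < K ∧ c = 0 then (r : Int) * 30 else val r c) := by
  intro K
  induction K with
  | zero =>
    intro _
    exact pvP_congr m n M val _ h (by intro r c _ _; simp)
  | succ K ih =>
    intro hK
    rw [List.range_succ, List.foldl_append, List.foldl_cons, List.foldl_nil]
    refine pvP_congr m n _ _ _ (pvP_setN m n _ _ K 0 ((K : Int) * 30) (ih (by omega)) (by omega) (by omega)) ?_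
    intro r c _ _
    by_cases h1 : r = K ∧ c = 0
    · simp [h1]
    · by_cases h2 : r < K + 1 ∧ c = 0 <;> by_cases h3 : r < K ∧ c = 0 <;>
        simp_all <;> omega

-- row init: OPT[0][j] = j * 30
lemma pvPhase_row (m n : Nat) (M : List (List Int)) (val : Nat → Nat → Int) (h : pvP m n M val) :
    ∀ L, L ≤ n + 1 →
      pvP m n ((List.range L).foldl (fun O l => pvSetN O 0 l ((l : Int) * 30)) M)
        (fun r c => if r = 0 ∧ c < L then (c : Int) * 30 else val r c) := by
  intro L
  induction L with
  | zero =>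
    intro _
    exact pvP_congr m n M val _ h (by intro r c _ _; simp)
  | succ L ih =>
    intro hL
    rw [List.range_succ, List.foldl_append, List.foldl_cons, List.foldl_nil]
    refine pvP_congr m n _ _ _ (pvP_setN m n _ _ 0 L ((L : Int) * 30) (ih (by omega)) (by omega) (by omega)) ?_
    intro r c _ _
    by_cases h1 : r = 0 ∧ c = L
    · simp [h1]
    · by_cases h2 : r = 0 ∧ c < L + 1 <;> by_cases h3 : r = 0 ∧ c < L <;>
        simp_all <;> omega

-- one row of the main fill
lemma pvPhase_inner (m n : Nat) (s1 s2 : List Char) (k : Nat) (hk : k < m) (M : List (List Int))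
    (h : pvP m n M (fun r c => if r ≤ k then pvOpt pvAlphaA s1 s2 r c else pvInit r c)) :
    ∀ L, L ≤ n →
      pvP m n ((List.range L).foldl (fun O l =>
          pvSetN O (k + 1) (l + 1)
            (min (min (pvG O k (l + 1) + 30) (pvG O (k + 1) l + 30))
              (pvG O k l + pvAlphaA (s1.getD k ' ') (s2.getD l ' ')))) M)
        (fun r c => if r ≤ k ∨ (r = k + 1 ∧ c ≤ L) then pvOpt pvAlphaA s1 s2 r c else pvInit r c) := by
  intro L
  induction L with
  | zero =>
    intro _
    refine pvP_congr m n M _ _ h ?_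
    intro r c _ _
    by_cases h1 : r ≤ k
    · simp [h1]
    · by_cases h2 : r = k + 1 ∧ c ≤ 0
      · obtain ⟨hr, hc⟩ := h2
        have hc0 : c = 0 := by omega
        subst hr hc0
        rw [if_neg h1, if_pos (by omega)]
        simp [pvInit, pvOpt]
      · rw [if_neg h1, if_neg (by omega)]
  | succ L ih =>
    intro hL
    specialize ih (by omega)
    rw [List.range_succ, List.foldl_append, List.foldl_cons, List.foldl_nil]
    set M' := (List.range L).foldl (fun O l =>
        pvSetN O (k + 1) (l + 1)
          (min (min (pvG O k (l + 1) + 30) (pvG O (k + 1) l + 30))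
            (pvG O k l + pvAlphaA (s1.getD k ' ') (s2.getD l ' ')))) M with hM'
    obtain ⟨p1, p2, p3⟩ := ih
    have e1 : pvG M' k (L + 1) = pvOpt pvAlphaA s1 s2 k (L + 1) := by
      rw [p3 k (L + 1) (by omega) (by omega)]; simp
    have e2 : pvG M' (k + 1) L = pvOpt pvAlphaA s1 s2 (k + 1) L := by
      rw [p3 (k + 1) L (by omega) (by omega)]; simp
    have e3 : pvG M' k L = pvOpt pvAlphaA s1 s2 k L := by
      rw [p3 k L (by omega) (by omega)]; simp
    rw [e1, e2, e3]
    have hv : min (min (pvOpt pvAlphaA s1 s2 k (L + 1) + 30) (pvOpt pvAlphaA s1 s2 (k + 1) L + 30))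
        (pvOpt pvAlphaA s1 s2 k L + pvAlphaA (s1.getD k ' ') (s2.getD L ' '))
        = pvOpt pvAlphaA s1 s2 (k + 1) (L + 1) := by
      conv_rhs => rw [pvOpt]
    rw [hv]
    refine pvP_congr m n _ _ _
      (pvP_setN m n M' _ (k + 1) (L + 1) (pvOpt pvAlphaA s1 s2 (k + 1) (L + 1))
        ⟨p1, p2, p3⟩ (by omega) (by omega)) ?_
    intro r c _ _
    by_cases h1 : r = k + 1 ∧ c = L + 1
    · rw [if_pos h1, if_pos (by omega)]
      obtain ⟨hr, hc⟩ := h1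
      subst hr hc
      rfl
    · by_cases h2 : r ≤ k ∨ (r = k + 1 ∧ c ≤ L)
      · rw [if_neg h1, if_pos h2, if_pos (by omega)]
      · rw [if_neg h1, if_neg h2, if_neg (by omega)]

-- the whole main fill
lemma pvPhase_outer (m n : Nat) (s1 s2 : List Char) (hm : m = s1.length) (M : List (List Int))
    (h : pvP m n M pvInit) :
    ∀ K, K ≤ m →
      pvP m n ((List.range K).foldl (fun O k =>
          (List.range n).foldl (fun O l =>
            pvSetN O (k + 1) (l + 1)
              (min (min (pvG O k (l + 1) + 30) (pvG O (k + 1) l + 30))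
                (pvG O k l + pvAlphaA (s1.getD k ' ') (s2.getD l ' ')))) O) M)
        (fun r c => if r ≤ K then pvOpt pvAlphaA s1 s2 r c else pvInit r c) := by
  intro K
  induction K with
  | zero =>
    intro _
    refine pvP_congr m n M _ _ h ?_
    intro r c _ _
    by_cases h1 : r = 0
    · subst h1
      rw [if_pos (by omega)]
      simp [pvInit, pvOpt]
    · rw [if_neg (by omega)]
  | succ K ih =>
    intro hK
    rw [List.range_succ, List.foldl_append, List.foldl_cons, List.foldl_nil]
    refine pvP_congr m n _ _ _
      (pvPhase_inner m n s1 s2 K (by omega) _ (ih (by omega)) n le_rfl) ?_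
    intro r c _ hc
    by_cases h1 : r ≤ K + 1
    · rw [if_pos (by omega), if_pos h1]
    · rw [if_neg (by omega), if_neg h1]

-- A's side: the imperative fill computes pvTab
lemma bottom_up_eq_tab (str_1 str_2 : String) :
    bottom_up str_1 str_2 = pvTab pvAlphaA str_1.toList str_2.toList := by
  have hr0m : PySem.List.pyRange 0 ((str_1.toList.length : Int) + 1) 1
      = (List.range (str_1.toList.length + 1)).map (fun k : Nat => (k : Int)) := by
    rw [show ((str_1.toList.length : Int) + 1) = ((str_1.toList.length + 1 : Nat) : Int) by push_cast; ring,
      PySem.List.pyRange_zero_nat]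
  have hr0n : PySem.List.pyRange 0 ((str_2.toList.length : Int) + 1) 1
      = (List.range (str_2.toList.length + 1)).map (fun k : Nat => (k : Int)) := by
    rw [show ((str_2.toList.length : Int) + 1) = ((str_2.toList.length + 1 : Nat) : Int) by push_cast; ring,
      PySem.List.pyRange_zero_nat]
  have hr1m : PySem.List.pyRange 1 ((str_1.toList.length : Int) + 1) 1
      = (List.range str_1.toList.length).map (fun k : Nat => 1 + (k : Int)) := by
    rw [PySem.List.pyRange_one]
    simp
  have hr1n : PySem.List.pyRange 1 ((str_2.toList.length : Int) + 1) 1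
      = (List.range str_2.toList.length).map (fun k : Nat => 1 + (k : Int)) := by
    rw [PySem.List.pyRange_one]
    simp
  unfold bottom_up
  simp only [PySem.Str.len_eq, hr0m, hr0n, hr1m, hr1n, List.foldl_map, List.map_map,
    Function.comp_def]
  have hstep1 : (fun (x : List (List Int)) (y : Nat) => pvSet2 x (↑y) 0 (↑y * pvDELTA))
      = fun O k => pvSetN O k 0 ((k : Int) * 30) := by
    funext O k
    have h := pvSet2_natCast O k 0 ((k : Int) * 30)
    push_cast at h
    simpa [pvDELTA] using h
  have hstep2 : (fun (x : List (List Int)) (y : Nat) => pvSet2 x 0 (↑y) (↑y * pvDELTA))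
      = fun O l => pvSetN O 0 l ((l : Int) * 30) := by
    funext O l
    have h := pvSet2_natCast O 0 l ((l : Int) * 30)
    push_cast at h
    simpa [pvDELTA] using h
  have hstep3 : (fun (x : List (List Int)) (y : Nat) =>
        List.foldl
          (fun (x : List (List Int)) (y_1 : Nat) =>
            pvSet2 x (1 + (y : Int)) (1 + (y_1 : Int))
              (min (min (pvGet2 x (1 + (y : Int) - 1) (1 + (y_1 : Int)) + pvDELTA)
                  (pvGet2 x (1 + (y : Int)) (1 + (y_1 : Int) - 1) + pvDELTA))
                (pvGet2 x (1 + (y : Int) - 1) (1 + (y_1 : Int) - 1) +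
                  pvAlphaA (PySem.List.pyGetD str_1.toList (1 + (y : Int) - 1) ' ')
                    (PySem.List.pyGetD str_2.toList (1 + (y_1 : Int) - 1) ' '))))
          x (List.range str_2.toList.length))
      = fun O k =>
        (List.range str_2.toList.length).foldl (fun O l =>
          pvSetN O (k + 1) (l + 1)
            (min (min (pvG O k (l + 1) + 30) (pvG O (k + 1) l + 30))
              (pvG O k l + pvAlphaA (str_1.toList.getD k ' ') (str_2.toList.getD l ' ')))) O := by
    funext O k
    have hf : (fun (x : List (List Int)) (y_1 : Nat) =>
        pvSet2 x (1 + (k : Int)) ((1 : Int) + (y_1 : Int))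
          (min (min (pvGet2 x (1 + (k : Int) - 1) (1 + (y_1 : Int)) + pvDELTA)
              (pvGet2 x (1 + (k : Int)) (1 + (y_1 : Int) - 1) + pvDELTA))
            (pvGet2 x (1 + (k : Int) - 1) (1 + (y_1 : Int) - 1) +
              pvAlphaA (PySem.List.pyGetD str_1.toList (1 + (k : Int) - 1) ' ')
                (PySem.List.pyGetD str_2.toList (1 + (y_1 : Int) - 1) ' '))))
        = fun O l => pvSetN O (k + 1) (l + 1)
            (min (min (pvG O k (l + 1) + 30) (pvG O (k + 1) l + 30))
              (pvG O k l + pvAlphaA (str_1.toList.getD k ' ') (str_2.toList.getD l ' '))) := by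
      funext O' l
      have i1 : (1 : Int) + (k : Int) - 1 = ((k : Nat) : Int) := by ring
      have j1 : (1 : Int) + (l : Int) - 1 = ((l : Nat) : Int) := by ring
      have i2 : (1 : Int) + (k : Int) = ((k + 1 : Nat) : Int) := by push_cast; ring
      have j2 : (1 : Int) + (l : Int) = ((l + 1 : Nat) : Int) := by push_cast; ring
      rw [i1, j1, i2, j2, pvSet2_natCast, pvGet2_natCast, pvGet2_natCast, pvGet2_natCast,
        PySem.List.pyGetD_natCast, PySem.List.pyGetD_natCast]
      simp [pvDELTA]
    rw [hf]
  rw [hstep1, hstep2, hstep3]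
  -- the initial zero matrix
  have h0 : pvP str_1.toList.length str_2.toList.length
      ((List.range (str_1.toList.length + 1)).map
        (fun _ => (List.range (str_2.toList.length + 1)).map (fun _ => (0 : Int))))
      (fun _ _ => 0) := by
    refine ⟨by simp, ?_, ?_⟩
    · intro r hr
      rw [List.getD_eq_getElem _ [] (by simpa using hr)]
      simp
    · intro r c hr hc
      unfold pvG
      rw [List.getD_eq_getElem _ [] (by simpa using hr)]
      simp
  have hcol := pvPhase_col str_1.toList.length str_2.toList.length _ _ h0
    (str_1.toList.length + 1) le_rfl
  have hrow := pvPhase_row str_1.toList.length str_2.toList.length _ _ hcol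
    (str_2.toList.length + 1) le_rfl
  have hinit : pvP str_1.toList.length str_2.toList.length _ pvInit :=
    pvP_congr _ _ _ _ _ hrow (by
      intro r c hr hc
      unfold pvInit
      by_cases h1 : r = 0
      · subst h1
        rw [if_pos ⟨rfl, hc⟩, if_pos rfl]
      · rw [if_neg (by omega), if_neg h1]
        by_cases h2 : c = 0
        · rw [if_pos ⟨hr, h2⟩, if_pos h2]
        · rw [if_neg (by omega), if_neg h2])
  obtain ⟨q1, q2, q3⟩ := pvPhase_outer str_1.toList.length str_2.toList.length
    str_1.toList str_2.toList rfl _ hinit str_1.toList.length le_rfl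
  apply List.ext_getElem
  · rw [q1]
    simp [pvTab]
  · intro r h1 h2
    have hr : r < str_1.toList.length + 1 := by rwa [q1] at h1
    have hrowlen := q2 r hr
    apply List.ext_getElem
    · rw [← List.getD_eq_getElem _ [] h1, hrowlen]
      simp [pvTab, pvRow]
    · intro c hc1 hc2
      rw [← List.getD_eq_getElem _ [] h1, hrowlen] at hc1
      have hval := q3 r c hr hc1
      simp only at hval
      rw [if_pos (by omega : r ≤ str_1.toList.length)] at hval
      rw [pvG_def, List.getD_eq_getElem _ [] h1, List.getD_eq_getElem _ 0 ?hlen] at hval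
      case hlen => rwa [← List.getD_eq_getElem _ [] h1, hrowlen]
      rw [hval]
      simp [pvTab, pvRow]

-- ===== VERDICT (by name: the statement is the Claim_ definition above) =====
theorem bottom_up_spec : Claim_equal_bottom_up := by
  intro str_1 str_2 _hd hpre
  unfold Spec_bottom_up
  rw [bottom_up_eq_tab, bottom_up_alt_eq_tab]
  apply pvTab_congr
  intro i hi j hj
  rcases hpre with h1 | h2 | ⟨ha, hb⟩
  · simp [h1] at hi
  · simp [h2] at hj
  · rw [List.getD_eq_getElem _ _ hi, List.getD_eq_getElem _ _ hj]
    exact pvAlpha_eq_score _ _ (ha _ (List.getElem_mem hi)) (hb _ (List.getElem_mem hj))
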